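-- pv_equiv track=rewrite | github.com/navidrast/cloudviz | cloudviz/visualization/layouts.py | _assign_to_circles
-- ===== SOURCE A (Python) =====
-- from typing import Dict, Any, Optional, List, Tuple
--
-- def _assign_to_circles(
--
--     center: str,
--     connections: Dict[str, List[str]]
-- ) -> Dict[int, List[str]]:
--     """Assign resources to concentric circles using BFS."""
--     circles = {0: [center]}
--     visited = {center}
--     current_circle = 0
--
--     while True:
--         next_circle_resources = []
--
--         for resource in circles[current_circle]:
--             for connected in connections.get(resource, []):
--                 if connected not in visited:
--                     next_circle_resources.append(connected)
--                     visited.add(connected)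
--
--         if not next_circle_resources:
--             break
--
--         current_circle += 1
--         circles[current_circle] = next_circle_resources
--
--     return circles
-- ===== SOURCE B (Python) =====
-- from collections import deque
--
-- def _assign_to_circles(center, connections):
--     """Single-queue BFS: pop one (node, dist) at a time instead of whole levels."""
--     circles = {0: [center]}
--     visited = {center}
--     queue = deque([(center, 0)])
--     while queue:
--         node, dist = queue.popleft()
--         for connected in connections.get(node, []):
--             if connected not in visited:
--                 visited.add(connected)
--                 queue.append((connected, dist + 1))
--                 circles.setdefault(dist + 1, []).append(connected)
--     return circles
-- ===== Notes on version B (the rewrite author's own statement) =====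
-- stated objective: alternative
-- what changed: Replaces A's level-at-a-time BFS (an outer while over circles plus a nested loop over the whole current circle building the next level) with a standard single-deque BFS that pops one (node, dist) at a time and appends newly visited nodes to circles.setdefault(dist+1, []); FIFO order keeps every circle's contents and order identical.
import Mathlib
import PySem

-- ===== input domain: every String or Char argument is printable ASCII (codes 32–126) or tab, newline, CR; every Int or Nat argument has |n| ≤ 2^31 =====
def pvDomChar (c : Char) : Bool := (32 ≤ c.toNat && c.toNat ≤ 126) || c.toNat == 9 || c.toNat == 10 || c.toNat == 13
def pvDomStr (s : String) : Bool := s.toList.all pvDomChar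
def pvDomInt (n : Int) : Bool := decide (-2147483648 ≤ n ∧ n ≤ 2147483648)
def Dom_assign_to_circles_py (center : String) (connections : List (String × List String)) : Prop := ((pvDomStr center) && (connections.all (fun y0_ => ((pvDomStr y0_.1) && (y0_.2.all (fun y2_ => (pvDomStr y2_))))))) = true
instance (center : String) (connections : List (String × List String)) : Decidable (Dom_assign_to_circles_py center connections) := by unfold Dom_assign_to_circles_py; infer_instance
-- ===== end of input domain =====

-- B replaces A's level-at-a-time BFS (nested loops per circle) by a single-queue
-- node-at-a-time BFS; same return value, no speed claim (objective: alternative).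

-- ===== PORT A =====
-- inner double loop of one while-iteration: for resource in circles[cur]:
--   for connected in connections.get(resource, []): if not visited: append
def pvScanA (conns : PySem.Dict String (List String))
    (st : List String × PySem.Set String) (resource : String) :
    List String × PySem.Set String :=
  (conns.getD resource []).foldl
    (fun st c => if c ∈ st.2 then st else (st.1 ++ [c], st.2.add c)) st

-- the 'while True' loop; the fuel argument only bounds the iteration count and is
-- proved sufficient (each iteration visits at least one fresh value of connections)
def pvLoopA (conns : PySem.Dict String (List String)) :
    Nat → PySem.Dict Int (List String) → PySem.Set String → Int →
    PySem.Dict Int (List String)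
  | 0, circles, _, _ => circles
  | f+1, circles, visited, cur =>
    let st := (circles.getD cur []).foldl (pvScanA conns) ([], visited)
    if st.1 = [] then circles
    else pvLoopA conns f (circles.insert (cur+1) st.1) st.2 (cur+1)

def assign_to_circles_py (center : String) (connections : List (String × List String)) : List (Int × List String) :=
  let conns := PySem.Dict.ofList connections
  (pvLoopA conns (conns.values.flatten.length + 1)
      (PySem.Dict.empty.insert 0 [center]) (PySem.Set.ofList [center]) 0).items

-- ===== PORT B =====
-- the 'while queue' loop: pop one (node, dist), scan its neighbours, appending
-- fresh ones to the queue and to circles.setdefault(dist+1, []) (= Dict.modify)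
def pvLoopB (conns : PySem.Dict String (List String)) :
    Nat → List (String × Int) → PySem.Set String → PySem.Dict Int (List String) →
    PySem.Dict Int (List String)
  | 0, _, _, circles => circles
  | f+1, queue, visited, circles =>
    match queue with
    | [] => circles
    | (node, d) :: rest =>
      let st := (conns.getD node []).foldl
        (fun (st : PySem.Set String × List (String × Int) × PySem.Dict Int (List String)) c =>
          if c ∈ st.1 then st
          else (st.1.add c, st.2.1 ++ [(c, d + 1)],
                st.2.2.modify (d + 1) [] (fun l => l ++ [c])))
        (visited, rest, circles)
      pvLoopB conns f st.2.1 st.1 st.2.2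

def assign_to_circles_py_alt (center : String) (connections : List (String × List String)) : List (Int × List String) :=
  let conns := PySem.Dict.ofList connections
  (pvLoopB conns (conns.values.flatten.length + 2)
      [(center, 0)] (PySem.Set.ofList [center]) (PySem.Dict.empty.insert 0 [center])).items

-- ===== PRECONDITION & SPEC =====
def Spec_assign_to_circles_py (center : String) (connections : List (String × List String)) (out : List (Int × List String)) : Prop := out = assign_to_circles_py_alt center connections
instance (center : String) (connections : List (String × List String)) (out : List (Int × List String)) : Decidable (Spec_assign_to_circles_py center connections out) := by unfold Spec_assign_to_circles_py; infer_instance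

-- ===== CLAIM (what is proved, stated in full; the proofs are below) =====
def Claim_equal_assign_to_circles_py : Prop := ∀ (center : String) (connections : List (String × List String)), Dom_assign_to_circles_py center connections → Spec_assign_to_circles_py center connections (assign_to_circles_py center connections)

-- ===== LEMMAS AND PROOFS =====

-- number of still-unvisited value occurrences: the BFS potential
def pvPot (U : List String) (visited : PySem.Set String) : Nat :=
  (U.filter (fun c => decide (c ∉ visited))).length

theorem pv_getD_of_not_contains {κ ν : Type} [BEq κ] (d : PySem.Dict κ ν) (k : κ) (dflt : ν)
    (h : d.contains k = false) : d.getD k dflt = dflt := by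
  have h' : d.items.find? (fun p => p.1 == k) = none := by
    rw [List.find?_eq_none]
    intro p hp
    rw [PySem.Dict.contains, List.any_eq_false] at h
    simp [h p hp]
  simp [PySem.Dict.getD, PySem.Dict.get?, h']

theorem pv_mem_values_of_get? {κ ν : Type} [BEq κ] (d : PySem.Dict κ ν) (k : κ) (v : ν)
    (h : d.get? k = some v) : v ∈ d.values := by
  simp only [PySem.Dict.get?, Option.map_eq_some_iff] at h
  obtain ⟨p, hp, rfl⟩ := h
  exact List.mem_map_of_mem (List.mem_of_find?_eq_some hp)

theorem pv_getD_subset_flatten (conns : PySem.Dict String (List String)) (r : String)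
    (c : String) (hc : c ∈ conns.getD r []) : c ∈ conns.values.flatten := by
  rcases h : conns.get? r with _ | v
  · simp [PySem.Dict.getD, h] at hc
  · rw [PySem.Dict.getD, h] at hc
    exact List.mem_flatten.mpr ⟨v, pv_mem_values_of_get? conns r v h, hc⟩

theorem pv_pot_add_lt (U : List String) (visited : PySem.Set String) (c : String)
    (hU : c ∈ U) (hv : c ∉ visited) : pvPot U (visited.add c) < pvPot U visited := by
  unfold pvPot
  have hsub : U.filter (fun x => decide (x ∉ visited.add c))
      = (U.filter (fun x => decide (x ∉ visited))).filter (fun x => decide (x ≠ c)) := by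
    rw [List.filter_filter]
    apply List.filter_congr
    intro x _
    simp [PySem.Set.mem_add, not_or, and_comm]
  rw [hsub]
  apply List.length_filter_lt_length_iff_exists.mpr
  exact ⟨c, List.mem_filter.mpr ⟨hU, by simpa using hv⟩, by simp⟩

-- the per-node child fold: A's (next, visited) view determines B's whole state
theorem pv_childfold (d : Int)
    (cs : List String) (visited : PySem.Set String) (next : List String)
    (rest : List (String × Int)) (base : PySem.Dict Int (List String))
    (hb : base.contains (d + 1) = false) :
    cs.foldl
      (fun (st : PySem.Set String × List (String × Int) × PySem.Dict Int (List String)) c =>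
        if c ∈ st.1 then st
        else (st.1.add c, st.2.1 ++ [(c, d + 1)],
              st.2.2.modify (d + 1) [] (fun l => l ++ [c])))
      (visited, rest ++ next.map (fun s => (s, d + 1)),
        if next = [] then base else base.insert (d + 1) next)
    = ((cs.foldl (fun st c => if c ∈ st.2 then st else (st.1 ++ [c], st.2.add c)) (next, visited)).2,
       rest ++ (cs.foldl (fun st c => if c ∈ st.2 then st else (st.1 ++ [c], st.2.add c)) (next, visited)).1.map (fun s => (s, d + 1)),
       if (cs.foldl (fun st c => if c ∈ st.2 then st else (st.1 ++ [c], st.2.add c)) (next, visited)).1 = []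
       then base else base.insert (d + 1)
         (cs.foldl (fun st c => if c ∈ st.2 then st else (st.1 ++ [c], st.2.add c)) (next, visited)).1) := by
  induction cs generalizing visited next with
  | nil => simp
  | cons c cs ih =>
    simp only [List.foldl_cons]
    by_cases hc : c ∈ visited
    · simp only [hc, if_pos]
      exact ih visited next
    · simp only [hc, if_neg, not_false_iff]
      have hmod : ((if next = [] then base else base.insert (d + 1) next).modify (d + 1) []
          (fun l => l ++ [c])) = base.insert (d + 1) (next ++ [c]) := by
        rcases eq_or_ne next [] with rfl | hne
        · simp [PySem.Dict.modify, pv_getD_of_not_contains base (d+1) [] hb]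
        · rw [if_neg hne]
          rw [PySem.Dict.modify, PySem.Dict.getD_insert_self, PySem.Dict.insert_insert_self]
      rw [hmod]
      have := ih (visited.add c) (next ++ [c])
      simpa [List.map_append, List.append_assoc] using this

-- processing one whole level through B's queue = A's level scan
theorem pv_level (conns : PySem.Dict String (List String)) (d : Int)
    (level : List String) (f : Nat) (visited : PySem.Set String) (next : List String)
    (base : PySem.Dict Int (List String)) (hb : base.contains (d + 1) = false)
    (hf : level.length ≤ f) :
    pvLoopB conns f (level.map (fun s => (s, d)) ++ next.map (fun s => (s, d + 1))) visited
      (if next = [] then base else base.insert (d + 1) next)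
    = pvLoopB conns (f - level.length)
        ((level.foldl (pvScanA conns) (next, visited)).1.map (fun s => (s, d + 1)))
        (level.foldl (pvScanA conns) (next, visited)).2
        (if (level.foldl (pvScanA conns) (next, visited)).1 = [] then base
         else base.insert (d + 1) (level.foldl (pvScanA conns) (next, visited)).1) := by
  induction level generalizing f visited next with
  | nil => simp
  | cons r lr ih =>
    simp only [List.length_cons] at hf
    obtain ⟨f, rfl⟩ : ∃ f', f = f' + 1 := ⟨f - 1, by omega⟩
    simp only [List.map_cons, List.cons_append, pvLoopB]
    rw [pv_childfold d _ visited next _ base hb]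
    simp only [List.foldl_cons]
    have := ih f (pvScanA conns (next, visited) r).2 (pvScanA conns (next, visited) r).1 (by omega)
    simp only [pvScanA] at this ⊢
    rw [this]
    have hfuel : f + 1 - (r :: lr).length = f - lr.length := by
      simp only [List.length_cons]
      omega
    rw [hfuel]

-- the main simulation: A's while-loop equals B's queue loop, by strong induction
-- on the potential of unvisited connection values
theorem pv_scan_pot (conns : PySem.Dict String (List String))
    (level : List String) (visited : PySem.Set String) (next : List String) :
    pvPot conns.values.flatten (level.foldl (pvScanA conns) (next, visited)).2
      + (level.foldl (pvScanA conns) (next, visited)).1.length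
    ≤ pvPot conns.values.flatten visited + next.length := by
  induction level generalizing visited next with
  | nil => simp
  | cons r lr ih =>
    simp only [List.foldl_cons]
    refine le_trans (ih (pvScanA conns (next, visited) r).2 (pvScanA conns (next, visited) r).1) ?_
    -- one node's child fold
    have key : ∀ cs : List String, (∀ c ∈ cs, c ∈ conns.values.flatten) → ∀ (v : PySem.Set String) (n : List String),
        pvPot conns.values.flatten ((cs.foldl (fun st c => if c ∈ st.2 then st else (st.1 ++ [c], st.2.add c)) (n, v)).2)
          + (cs.foldl (fun st c => if c ∈ st.2 then st else (st.1 ++ [c], st.2.add c)) (n, v)).1.length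
        ≤ pvPot conns.values.flatten v + n.length := by
      intro cs hcs
      induction cs with
      | nil => simp
      | cons c cs ihc =>
        intro v n
        simp only [List.foldl_cons]
        by_cases hc : c ∈ v
        · simpa [hc] using ihc (fun x hx => hcs x (List.mem_cons_of_mem _ hx)) v n
        · simp only [hc, if_neg, not_false_iff]
          refine le_trans (ihc (fun x hx => hcs x (List.mem_cons_of_mem _ hx)) (v.add c) (n ++ [c])) ?_
          have := pv_pot_add_lt conns.values.flatten v c (hcs c (List.mem_cons_self ..)) hc
          simp only [List.length_append, List.length_cons, List.length_nil]
          omega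
    exact key _ (fun c hc => pv_getD_subset_flatten conns r c hc) visited next

theorem pv_main (conns : PySem.Dict String (List String)) (P : Nat) :
    ∀ (fa fb : Nat) (visited : PySem.Set String)
      (circles : PySem.Dict Int (List String)) (cur : Int),
      (∀ k : Int, circles.contains k = true → k ≤ cur) →
      pvPot conns.values.flatten visited ≤ P →
      P < fa → (circles.getD cur []).length + P < fb →
      pvLoopA conns fa circles visited cur
        = pvLoopB conns fb ((circles.getD cur []).map (fun s => (s, cur))) visited circles := by
  induction P using Nat.strong_induction_on with
  | _ P ih =>
    intro fa fb visited circles cur hk hp hfa hfb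
    obtain ⟨fa, rfl⟩ : ∃ f', fa = f' + 1 := ⟨fa - 1, by omega⟩
    set level := circles.getD cur [] with hlevel
    set stA := level.foldl (pvScanA conns) ([], visited) with hstA
    have hbase : circles.contains (cur + 1) = false := by
      rcases h : circles.contains (cur + 1) with _ | _
      · rfl
      · exact absurd (hk _ h) (by omega)
    have hB := pv_level conns cur level fb visited [] circles hbase (by omega)
    simp only [List.map_nil, List.append_nil, ite_true, ← hstA] at hB
    have hpot := pv_scan_pot conns level visited []
    simp only [← hstA, List.length_nil, Nat.add_zero] at hpot
    rw [hB]
    show pvLoopA conns (fa + 1) circles visited cur = _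
    rw [pvLoopA]
    simp only [← hlevel, ← hstA]
    by_cases hempty : stA.1 = []
    · rw [if_pos hempty, hempty]
      obtain ⟨g, hg⟩ : ∃ g, fb - level.length = g + 1 := ⟨fb - level.length - 1, by omega⟩
      rw [hg]
      simp [pvLoopB]
    · rw [if_neg hempty, if_neg hempty]
      have hlen : 0 < stA.1.length := List.length_pos_of_ne_nil hempty
      have hget : (circles.insert (cur + 1) stA.1).getD (cur + 1) [] = stA.1 :=
        PySem.Dict.getD_insert_self ..
      have := ih (pvPot conns.values.flatten stA.2) (by omega) fa (fb - level.length)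
        stA.2 (circles.insert (cur + 1) stA.1) (cur + 1)
        (by
          intro k hkc
          rw [PySem.Dict.contains_insert] at hkc
          rcases Bool.or_eq_true_iff.mp hkc with h | h
          · have : k = cur + 1 := by simpa using h
            omega
          · have := hk k h
            omega)
        le_rfl (by omega) (by rw [hget]; omega)
      rw [this, hget]

-- ===== VERDICT (by name: the statement is the Claim_ definition above) =====
theorem assign_to_circles_py_spec : Claim_equal_assign_to_circles_py := by
  intro center connections _
  unfold Spec_assign_to_circles_py assign_to_circles_py assign_to_circles_py_alt
  set conns := PySem.Dict.ofList connections
  have hget : (PySem.Dict.empty.insert (0:Int) [center]).getD 0 [] = [center] :=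
    PySem.Dict.getD_insert_self ..
  have hmain := pv_main conns (pvPot conns.values.flatten (PySem.Set.ofList [center]))
    (conns.values.flatten.length + 1) (conns.values.flatten.length + 2)
    (PySem.Set.ofList [center]) (PySem.Dict.empty.insert 0 [center]) 0
    (by
      intro k hkc
      rw [PySem.Dict.contains_insert] at hkc
      rcases Bool.or_eq_true_iff.mp hkc with h | h
      · have : k = (0 : Int) := by simpa using h
        omega
      · simp [PySem.Dict.contains, PySem.Dict.empty] at h)
    le_rfl
    (by have : pvPot conns.values.flatten (PySem.Set.ofList [center]) ≤ conns.values.flatten.length :=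
          List.length_filter_le ..
        omega)
    (by have : pvPot conns.values.flatten (PySem.Set.ofList [center]) ≤ conns.values.flatten.length :=
          List.length_filter_le ..
        rw [hget]
        simp only [List.length_cons, List.length_nil]
        omega)
  show (pvLoopA conns (conns.values.flatten.length + 1) (PySem.Dict.empty.insert 0 [center])
      (PySem.Set.ofList [center]) 0).items
    = (pvLoopB conns (conns.values.flatten.length + 2) [(center, 0)]
        (PySem.Set.ofList [center]) (PySem.Dict.empty.insert 0 [center])).items
  rw [hmain, hget]
  simp
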